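-- pv_equiv track=rewrite | github.com/BroskiJ/language_learning_chatbot | vocabulary_service.py | parse_vocabulary_text
-- ===== SOURCE A (Python) =====
-- def parse_vocabulary_text(text):
--     """
--     Parse a text input of vocabulary words/phrases.
--     Separates by newlines and commas, then cleans up the results.
--
--     Args:
--         text (str): The vocabulary text
--
--     Returns:
--         list: List of vocabulary words/phrases
--     """
--     # First split by newlines
--     lines = text.strip().split('\n')
--     words = []
--
--     for line in lines:
--         # Then split by commas
--         parts = line.split(',')
--         for part in parts:
--             word = part.strip()
--             if word:  # Only add non-empty words
--                 words.append(word)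
--
--     return words
-- ===== SOURCE B (Python) =====
-- def parse_vocabulary_text(text):
--     """Single-pass scanner: flush the accumulated token at each ',' or '\n'."""
--     words = []
--     cur = []
--     for ch in text.strip() + '\n':
--         if ch == ',' or ch == '\n':
--             word = ''.join(cur).strip()
--             if word:
--                 words.append(word)
--             cur = []
--         else:
--             cur.append(ch)
--     return words
-- ===== Notes on version B (the rewrite author's own statement) =====
-- stated objective: alternative
-- what changed: A's two-level split (strip, split('\n'), then split(',') per line) is replaced by a single left-to-right character scan that accumulates the current token and flushes it, stripped and filtered, at each ',' or '\n' delimiter.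
import Mathlib
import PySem

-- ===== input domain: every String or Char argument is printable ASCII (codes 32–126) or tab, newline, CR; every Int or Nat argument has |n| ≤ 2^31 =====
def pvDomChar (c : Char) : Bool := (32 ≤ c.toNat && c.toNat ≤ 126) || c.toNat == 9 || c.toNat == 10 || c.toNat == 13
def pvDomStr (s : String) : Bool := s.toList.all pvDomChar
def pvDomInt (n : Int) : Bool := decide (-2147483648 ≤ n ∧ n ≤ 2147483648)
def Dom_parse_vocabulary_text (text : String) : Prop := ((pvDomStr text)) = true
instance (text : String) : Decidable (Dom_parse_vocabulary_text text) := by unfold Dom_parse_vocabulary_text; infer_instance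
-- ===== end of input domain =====

-- B replaces A's nested newline-then-comma split loops by a single left-to-right scan
-- that flushes the accumulated token at each ',' or '\n' (objective: alternative decomposition).

-- ===== PORT A =====
-- literal port of A: strip, split('\n'), split(','), strip each part, keep non-empty
def parse_vocabulary_text (text : String) : List String :=
  let lines := (PySem.Str.split? (PySem.Str.strip text) "\n").getD []
  lines.foldl (fun words line =>
    ((PySem.Str.split? line ",").getD []).foldl (fun words part =>
      let word := PySem.Str.strip part
      if word ≠ "" then words ++ [word] else words) words) []

-- ===== PORT B =====
-- literal port of B: one pass over text.strip() + '\n', flushing the char accumulator at delimiters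
def parse_vocabulary_text_alt (text : String) : List String :=
  (((PySem.Str.strip text).toList ++ ['\n']).foldl
    (fun (st : List String × List Char) ch =>
      if ch = ',' ∨ ch = '\n' then
        let word := PySem.Chars.strip st.2
        (if word ≠ [] then st.1 ++ [String.ofList word] else st.1, [])
      else (st.1, st.2 ++ [ch])) ([], [])).1

-- ===== PRECONDITION & SPEC =====
def Spec_parse_vocabulary_text (text : String) (out : List String) : Prop := out = parse_vocabulary_text_alt text
instance (text : String) (out : List String) : Decidable (Spec_parse_vocabulary_text text out) := by unfold Spec_parse_vocabulary_text; infer_instance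

-- ===== CLAIM (what is proved, stated in full; the proofs are below) =====
def Claim_equal_parse_vocabulary_text : Prop := ∀ (text : String), Dom_parse_vocabulary_text text → Spec_parse_vocabulary_text text (parse_vocabulary_text text)

-- ===== LEMMAS AND PROOFS =====

-- proof-side splitter: split a char list on the characters satisfying p, with pending token cur
def pvSplit (p : Char → Bool) (cur : List Char) : List Char → List (List Char)
  | [] => [cur]
  | c :: rest => if p c then cur :: pvSplit p [] rest else pvSplit p (cur ++ [c]) rest

-- proof-side token step shared by both sides: strip the token, append it if non-empty
def pvTok (ws : List String) (t : List Char) : List String :=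
  if PySem.Chars.strip t ≠ [] then ws ++ [String.ofList (PySem.Chars.strip t)] else ws

lemma pvSplit_ne_nil (p : Char → Bool) (l cur : List Char) : pvSplit p cur l ≠ [] := by
  induction l generalizing cur with
  | nil => simp [pvSplit]
  | cons c rest ih =>
    simp only [pvSplit]
    split
    · simp
    · exact ih _

lemma pvSplit_concat_true {p : Char → Bool} {ch : Char} (hch : p ch = true) :
    ∀ (l cur : List Char) (ps : List (List Char)) (p0 : List Char),
      pvSplit p cur l = ps ++ [p0] → pvSplit p cur (l ++ [ch]) = (ps ++ [p0]) ++ [[]] := by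
  intro l
  induction l with
  | nil =>
    intro cur ps p0 h
    rcases ps with _ | ⟨a, t⟩
    · have hc : cur = p0 := by simpa [pvSplit] using h
      subst hc
      simp [pvSplit, hch]
    · simp [pvSplit] at h
  | cons d rest ih =>
    intro cur ps p0 h
    simp only [List.cons_append, pvSplit] at h ⊢
    by_cases hd : p d = true
    · simp only [hd, if_true] at h ⊢
      cases ps with
      | nil =>
        exfalso
        have : pvSplit p [] rest = [] := by simpa using (List.cons_eq_cons.mp (by simpa using h)).2
        exact pvSplit_ne_nil _ _ _ this
      | cons a t =>
        obtain ⟨rfl, h2⟩ := List.cons_eq_cons.mp (by simpa using h)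
        rw [ih [] t p0 h2]
        simp
    · simp only [hd] at h ⊢
      exact ih _ ps p0 h

lemma pvSplit_concat_false {p : Char → Bool} {ch : Char} (hch : p ch = false) :
    ∀ (l cur : List Char) (ps : List (List Char)) (p0 : List Char),
      pvSplit p cur l = ps ++ [p0] → pvSplit p cur (l ++ [ch]) = ps ++ [p0 ++ [ch]] := by
  intro l
  induction l with
  | nil =>
    intro cur ps p0 h
    rcases ps with _ | ⟨a, t⟩
    · have hc : cur = p0 := by simpa [pvSplit] using h
      subst hc
      simp [pvSplit, hch]
    · simp [pvSplit] at h
  | cons d rest ih =>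
    intro cur ps p0 h
    simp only [List.cons_append, pvSplit] at h ⊢
    by_cases hd : p d = true
    · simp only [hd, if_true] at h ⊢
      cases ps with
      | nil =>
        exfalso
        have : pvSplit p [] rest = [] := by simpa using (List.cons_eq_cons.mp (by simpa using h)).2
        exact pvSplit_ne_nil _ _ _ this
      | cons a t =>
        obtain ⟨rfl, h2⟩ := List.cons_eq_cons.mp (by simpa using h)
        rw [ih [] t p0 h2]
        simp
    · simp only [hd] at h ⊢
      exact ih _ ps p0 h

-- PySem's splitOn on a single-character separator is pvSplit on (· == c)
lemma pvGo_single (c : Char) :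
    ∀ (fuel : Nat) (l cur : List Char) (acc : List (List Char)), l.length < fuel →
      PySem.Chars.splitOn.go [c] fuel l cur acc
        = acc.reverse ++ pvSplit (· == c) cur.reverse l := by
  intro fuel
  induction fuel with
  | zero => intro l cur acc h; omega
  | succ n ih =>
    intro l cur acc h
    cases l with
    | nil => simp [PySem.Chars.splitOn.go, pvSplit]
    | cons d rest =>
      rw [PySem.Chars.splitOn.go]
      by_cases hd : c = d
      · subst hd
        have hpref : [c].isPrefixOf (c :: rest) = true := by simp [List.isPrefixOf]
        simp only [hpref, if_true, List.length_singleton, List.drop_succ_cons, List.drop_zero]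
        rw [ih rest [] (cur.reverse :: acc) (by simpa using Nat.lt_of_succ_lt_succ h)]
        simp [pvSplit]
      · have hpref : [c].isPrefixOf (d :: rest) = false := by
          simp [List.isPrefixOf, hd]
        simp only [hpref]
        rw [ih rest (d :: cur) acc (by simpa using Nat.lt_of_succ_lt_succ h)]
        have hbeq : (d == c) = false := beq_eq_false_iff_ne.mpr (fun h' => hd h'.symm)
        simp [pvSplit, hbeq]

lemma pvSplitOn_single (s : List Char) (c : Char) :
    PySem.Chars.splitOn s [c] = pvSplit (· == c) [] s := by
  have := pvGo_single c (s.length + 1) s [] [] (by omega)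
  simpa [PySem.Chars.splitOn] using this

-- merging the two single-character splits into the combined split
lemma pvFlat (q r : Char → Bool) :
    ∀ (l pend : List Char) (ps : List (List Char)) (p0 : List Char),
      pvSplit r [] pend = ps ++ [p0] →
      (pvSplit q pend l).flatMap (pvSplit r [])
        = ps ++ pvSplit (fun c => r c || q c) p0 l := by
  intro l
  induction l with
  | nil =>
    intro pend ps p0 h
    simp [pvSplit, h]
  | cons ch rest ih =>
    intro pend ps p0 h
    simp only [pvSplit]
    by_cases hq : q ch = true
    · simp only [hq, Bool.or_true, if_true, List.flatMap_cons, h]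
      rw [ih [] [] [] (by simp [pvSplit])]
      simp
    · have hq' : q ch = false := by simpa using hq
      by_cases hr : r ch = true
      · simp only [hq', hr, Bool.true_or, Bool.false_eq_true, if_false, if_true]
        rw [ih (pend ++ [ch]) (ps ++ [p0]) []
            (pvSplit_concat_true hr pend [] ps p0 h)]
        simp
      · have hr' : r ch = false := by simpa using hr
        simp only [hq', hr', Bool.or_self, Bool.false_eq_true, if_false]
        rw [ih (pend ++ [ch]) ps (p0 ++ [ch])
            (pvSplit_concat_false hr' pend [] ps p0 h)]

-- nested foldl over the split pieces = foldl over the flattened pieces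
lemma pvFoldFlat (lines : List (List Char)) (r : Char → Bool) :
    ∀ ws : List String,
      lines.foldl (fun ws line => (pvSplit r [] line).foldl pvTok ws) ws
        = (lines.flatMap (pvSplit r [])).foldl pvTok ws := by
  induction lines with
  | nil => intro ws; simp
  | cons a t ih => intro ws; simp [List.foldl_append, ih]

-- B's scanning fold computes the pvTok-fold over the combined split
lemma pvScan (l : List Char) :
    ∀ (ws : List String) (cur : List Char),
      ((l ++ ['\n']).foldl
        (fun (st : List String × List Char) ch =>
          if ch = ',' ∨ ch = '\n' then
            (if PySem.Chars.strip st.2 ≠ [] then st.1 ++ [String.ofList (PySem.Chars.strip st.2)] else st.1, [])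
          else (st.1, st.2 ++ [ch])) (ws, cur)).1
      = (pvSplit (fun c => c == ',' || c == '\n') cur l).foldl pvTok ws := by
  induction l with
  | nil =>
    intro ws cur
    simp [pvSplit, pvTok]
  | cons ch rest ih =>
    intro ws cur
    by_cases hd : ch = ',' ∨ ch = '\n'
    · have hb : (ch == ',' || ch == '\n') = true := by
        rcases hd with h | h <;> simp [h]
      simp only [List.cons_append, List.foldl_cons, if_pos hd, pvSplit, hb, if_true,
        List.foldl_cons]
      rw [ih]
      rfl
    · have hb : (ch == ',' || ch == '\n') = false := by
        simp only [not_or] at hd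
        simp [hd.1, hd.2]
      simp only [List.cons_append, List.foldl_cons, if_neg hd, pvSplit, hb]
      exact ih ws (cur ++ [ch])

-- A's nested fold, moved to the char level
lemma pvA_char (text : String) :
    parse_vocabulary_text text
      = (pvSplit (· == '\n') [] (PySem.Chars.strip text.toList)).foldl
          (fun ws line => (pvSplit (· == ',') [] line).foldl pvTok ws) [] := by
  have hsplit : ∀ (s : List Char) (c : Char),
      PySem.Chars.split? s [c] = some (pvSplit (· == c) [] s) := by
    intro s c
    simp [PySem.Chars.split?, pvSplitOn_single]
  unfold parse_vocabulary_text
  simp only [PySem.Str.split?, PySem.Str.toList_strip,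
    show ("\n" : String).toList = ['\n'] from rfl,
    show ("," : String).toList = [','] from rfl,
    hsplit, Option.map_some, Option.getD_some]
  rw [List.foldl_map]
  apply List.foldl_ext
  intro ws line _
  simp only [String.toList_ofList]
  rw [List.foldl_map]
  apply List.foldl_ext
  intro ws' part _
  show (if PySem.Str.strip (String.ofList part) ≠ "" then ws' ++ [PySem.Str.strip (String.ofList part)] else ws') = pvTok ws' part
  have hs : PySem.Str.strip (String.ofList part) = String.ofList (PySem.Chars.strip part) := by
    simp [PySem.Str.strip]
  rw [hs, pvTok]
  by_cases hnil : PySem.Chars.strip part = []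
  · simp [hnil]
  · simp [hnil]

-- ===== VERDICT (by name: the statement is the Claim_ definition above) =====
theorem parse_vocabulary_text_spec : Claim_equal_parse_vocabulary_text := by
  intro text _
  unfold Spec_parse_vocabulary_text
  rw [pvA_char]
  unfold parse_vocabulary_text_alt
  simp only [PySem.Str.toList_strip]
  rw [pvScan (PySem.Chars.strip text.toList) [] []]
  rw [pvFoldFlat, pvFlat (· == '\n') (· == ',') _ _ [] [] (by simp [pvSplit])]
  simp
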